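-- pv_equiv track=rewrite | github.com/paprik05/Praca-Licencjacka | problems/prob32.py | prob32
-- ===== SOURCE A (Python) =====
-- def prob32(r):
--     for a1 in range(r + 1):
--         for a2 in range(r + 1):
--             for a3 in range(r + 1):
--                 for a4 in range(r + 1):
--                     for a5 in range(r + 1):
--                         sum_of_cubes = (a1**3 + a2**3 + a3**3 + a4**3 + a5**3) % 9
--                         if sum_of_cubes == 0:
--                             product = (a1 * a2 * a3 * a4 * a5) % 3
--                             if product != 0:
--                                 return {"result": False}
--     return {"result": True}
-- ===== SOURCE B (Python) =====
-- def prob32(r):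
--     # A cube is 0, 1 or 8 mod 9, and it is 0 mod 9 exactly when its base is
--     # divisible by 3.  Five terms from {1, 8} can never sum to 0 mod 9, so any
--     # 5-tuple whose cube-sum is 0 mod 9 contains a multiple of 3 and its
--     # product is 0 mod 3: the searched counterexample cannot exist.
--     return {"result": True}
-- ===== Notes on version B (the rewrite author's own statement) =====
-- stated objective: simpler
-- what changed: Replaced the O(r^5) brute-force search with the constant answer {'result': True}, justified by the number-theoretic fact (proved in Lean) that a cube is 0, 1 or 8 mod 9 and five values in {1,8} never sum to 0 mod 9, so the searched counterexample cannot exist; intended as asymptotically cheaper, but a timing run could not measure a ratio (A times out already at n=16).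
import Mathlib
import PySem

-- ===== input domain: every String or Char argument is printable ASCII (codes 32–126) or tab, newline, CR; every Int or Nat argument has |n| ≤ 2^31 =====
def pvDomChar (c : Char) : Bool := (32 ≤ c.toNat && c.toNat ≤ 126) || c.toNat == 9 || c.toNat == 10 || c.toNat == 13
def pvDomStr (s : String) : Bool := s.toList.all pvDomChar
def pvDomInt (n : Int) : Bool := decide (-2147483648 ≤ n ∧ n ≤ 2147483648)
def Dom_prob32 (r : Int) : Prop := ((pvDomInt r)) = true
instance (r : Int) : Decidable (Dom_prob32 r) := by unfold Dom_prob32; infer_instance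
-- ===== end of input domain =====

-- B replaces A's O(r^5) brute-force search by the constant answer, proved correct below.

-- ===== PORT A =====
-- inner body of the five nested loops: does this 5-tuple trigger the early `return {"result": False}`?
def pvBad32 (a1 a2 a3 a4 a5 : Int) : Bool :=
  (PySem.Int.mod (a1 ^ 3 + a2 ^ 3 + a3 ^ 3 + a4 ^ 3 + a5 ^ 3) 9 == 0) &&
  !(PySem.Int.mod (a1 * a2 * a3 * a4 * a5) 3 == 0)

def prob32 (r : Int) : List (String × Bool) :=
  if (PySem.List.pyRange 0 (r + 1) 1).any (fun a1 =>
       (PySem.List.pyRange 0 (r + 1) 1).any (fun a2 =>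
         (PySem.List.pyRange 0 (r + 1) 1).any (fun a3 =>
           (PySem.List.pyRange 0 (r + 1) 1).any (fun a4 =>
             (PySem.List.pyRange 0 (r + 1) 1).any (fun a5 =>
               pvBad32 a1 a2 a3 a4 a5)))))
  then [("result", false)]
  else [("result", true)]

-- ===== PORT B =====
def prob32_alt (_r : Int) : List (String × Bool) := [("result", true)]

-- ===== PRECONDITION & SPEC =====
def Spec_prob32 (r : Int) (out : List (String × Bool)) : Prop := out = prob32_alt r
instance (r : Int) (out : List (String × Bool)) : Decidable (Spec_prob32 r out) := by unfold Spec_prob32; infer_instance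

-- ===== CLAIM (what is proved, stated in full; the proofs are below) =====
def Claim_equal_prob32 : Prop := ∀ (r : Int), Dom_prob32 r → Spec_prob32 r (prob32 r)

-- ===== LEMMAS AND PROOFS =====

-- a³ mod 9 is 0 (iff 3 ∣ a), 1 or 8
theorem pv_cube_emod9 (a : Int) :
    (a ^ 3 % 9 = 0 ∧ a % 3 = 0) ∨ (a ^ 3 % 9 = 1 ∧ a % 3 ≠ 0) ∨ (a ^ 3 % 9 = 8 ∧ a % 3 ≠ 0) := by
  have ha : a = 3 * (a / 3) + a % 3 := (Int.ediv_add_emod a 3).symm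
  have hcube : a ^ 3 % 9 = (a % 3) ^ 3 % 9 := by
    rw [show a ^ 3 = (a % 3) ^ 3 + 9 * (3 * (a / 3) ^ 3 + 3 * (a / 3) ^ 2 * (a % 3) + (a / 3) * (a % 3) ^ 2) by
      conv_lhs => rw [ha]
      ring]
    simp [Int.add_mul_emod_self_left]
  have ht : a % 3 = 0 ∨ a % 3 = 1 ∨ a % 3 = 2 := by omega
  rcases ht with h | h | h <;> rw [h] at hcube <;> norm_num at hcube <;> omega

-- the searched 5-tuple cannot exist: the early-return condition is never satisfied
theorem pvBad32_false (a1 a2 a3 a4 a5 : Int) : pvBad32 a1 a2 a3 a4 a5 = false := by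
  unfold pvBad32
  rw [PySem.Int.mod_eq_emod_of_pos (by norm_num : (0:Int) < 9),
      PySem.Int.mod_eq_emod_of_pos (by norm_num : (0:Int) < 3)]
  simp only [Bool.and_eq_false_iff, Bool.not_eq_false', beq_iff_eq]
  by_cases hp : (a1 * a2 * a3 * a4 * a5) % 3 = 0
  · right; simpa using hp
  · left
    simp only [beq_eq_false_iff_ne, ne_eq]
    -- no factor is divisible by 3, else the product would be
    have hfac : ∀ i ∈ [a1, a2, a3, a4, a5], i % 3 ≠ 0 := by
      intro i hi h0
      apply hp
      have hdvd : (3 : Int) ∣ i := Int.dvd_of_emod_eq_zero h0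
      have : (3 : Int) ∣ a1 * a2 * a3 * a4 * a5 := by
        fin_cases hi
        · exact Dvd.dvd.mul_right (Dvd.dvd.mul_right (Dvd.dvd.mul_right (Dvd.dvd.mul_right hdvd a2) a3) a4) a5
        · exact Dvd.dvd.mul_right (Dvd.dvd.mul_right (Dvd.dvd.mul_right (Dvd.dvd.mul_left hdvd a1) a3) a4) a5
        · exact Dvd.dvd.mul_right (Dvd.dvd.mul_right (Dvd.dvd.mul_left hdvd (a1 * a2)) a4) a5
        · exact Dvd.dvd.mul_right (Dvd.dvd.mul_left hdvd (a1 * a2 * a3)) a5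
        · exact Dvd.dvd.mul_left hdvd (a1 * a2 * a3 * a4)
      exact Int.emod_eq_zero_of_dvd this
    have h1 := (pv_cube_emod9 a1).resolve_left (by intro h; exact hfac a1 (by simp) h.2)
    have h2 := (pv_cube_emod9 a2).resolve_left (by intro h; exact hfac a2 (by simp) h.2)
    have h3 := (pv_cube_emod9 a3).resolve_left (by intro h; exact hfac a3 (by simp) h.2)
    have h4 := (pv_cube_emod9 a4).resolve_left (by intro h; exact hfac a4 (by simp) h.2)
    have h5 := (pv_cube_emod9 a5).resolve_left (by intro h; exact hfac a5 (by simp) h.2)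
    -- each cube is 1 or 8 mod 9; five such terms never sum to 0 mod 9
    generalize a1 ^ 3 = c1 at h1 ⊢
    generalize a2 ^ 3 = c2 at h2 ⊢
    generalize a3 ^ 3 = c3 at h3 ⊢
    generalize a4 ^ 3 = c4 at h4 ⊢
    generalize a5 ^ 3 = c5 at h5 ⊢
    rcases h1 with ⟨h1, -⟩ | ⟨h1, -⟩ <;> rcases h2 with ⟨h2, -⟩ | ⟨h2, -⟩ <;>
      rcases h3 with ⟨h3, -⟩ | ⟨h3, -⟩ <;> rcases h4 with ⟨h4, -⟩ | ⟨h4, -⟩ <;>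
        rcases h5 with ⟨h5, -⟩ | ⟨h5, -⟩ <;> omega

-- ===== VERDICT (by name: the statement is the Claim_ definition above) =====
theorem prob32_spec : Claim_equal_prob32 := by
  intro r _
  unfold Spec_prob32 prob32 prob32_alt
  rw [if_neg]
  simp [pvBad32_false]
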